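-- pv_equiv track=rewrite | github.com/patricklamba/Projet_final_formation | indicators/candlestick_patterns.py | _patterns_to_signal
-- ===== SOURCE A (Python) =====
-- def _patterns_to_signal(patterns: list) -> int:
--     """Convertit les patterns en signal numérique"""
--     bullish_patterns = ["HAMMER", "BULLISH_ENGULFING", "MORNING_STAR"]
--     bearish_patterns = ["SHOOTING_STAR", "BEARISH_ENGULFING", "EVENING_STAR"]
--
--     bull_count = sum(1 for p in patterns if p in bullish_patterns)
--     bear_count = sum(1 for p in patterns if p in bearish_patterns)
--
--     if bull_count > bear_count:
--         return 1
--     elif bear_count > bull_count: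
--         return -1
--     else:
--         return 0
-- ===== SOURCE B (Python) =====
-- def _patterns_to_signal(patterns: list) -> int:
--     """Convertit les patterns en signal numérique"""
--     score = {
--         "HAMMER": 1, "BULLISH_ENGULFING": 1, "MORNING_STAR": 1,
--         "SHOOTING_STAR": -1, "BEARISH_ENGULFING": -1, "EVENING_STAR": -1,
--     }
--     net = 0
--     for p in patterns:
--         net += score.get(p, 0)
--     return (net > 0) - (net < 0)
-- ===== Notes on version B (the rewrite author's own statement) =====
-- stated objective: simpler
-- what changed: Replaces the two independent counting passes and three-way comparison with a single pass accumulating one signed net score via a pattern->(+1/-1) dict, returning the sign of the net.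
import Mathlib
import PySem

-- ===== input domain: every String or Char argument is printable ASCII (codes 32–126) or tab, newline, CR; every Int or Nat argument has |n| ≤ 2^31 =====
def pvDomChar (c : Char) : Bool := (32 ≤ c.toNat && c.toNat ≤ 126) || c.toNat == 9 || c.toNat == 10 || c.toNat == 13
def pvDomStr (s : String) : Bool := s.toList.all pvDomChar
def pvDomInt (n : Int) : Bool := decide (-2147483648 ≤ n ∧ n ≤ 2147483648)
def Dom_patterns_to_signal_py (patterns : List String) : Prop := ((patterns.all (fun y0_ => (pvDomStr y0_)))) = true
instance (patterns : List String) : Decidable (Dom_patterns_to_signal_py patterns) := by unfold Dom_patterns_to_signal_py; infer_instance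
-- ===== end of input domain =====

-- B replaces A's two counting passes + three-way comparison by one pass over a
-- pattern->(+1/-1) score dict accumulating a single signed net, returning its sign (objective: simpler).

-- ===== PORT A =====
def patterns_to_signal_py (patterns : List String) : Int :=
  let bullish_patterns : List String := ["HAMMER", "BULLISH_ENGULFING", "MORNING_STAR"]
  let bearish_patterns : List String := ["SHOOTING_STAR", "BEARISH_ENGULFING", "EVENING_STAR"]
  let bull_count : Int := patterns.foldl (fun acc p => if p ∈ bullish_patterns then acc + 1 else acc) 0
  let bear_count : Int := patterns.foldl (fun acc p => if p ∈ bearish_patterns then acc + 1 else acc) 0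
  if bull_count > bear_count then 1
  else if bear_count > bull_count then -1
  else 0

-- ===== PORT B =====
def pvScoreDict : PySem.Dict String Int :=
  PySem.Dict.ofList [("HAMMER", 1), ("BULLISH_ENGULFING", 1), ("MORNING_STAR", 1),
    ("SHOOTING_STAR", -1), ("BEARISH_ENGULFING", -1), ("EVENING_STAR", -1)]

def patterns_to_signal_py_alt (patterns : List String) : Int :=
  let net : Int := patterns.foldl (fun net p => net + pvScoreDict.getD p 0) 0
  (if net > 0 then (1 : Int) else 0) - (if net < 0 then 1 else 0)

-- ===== PRECONDITION & SPEC =====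
def Spec_patterns_to_signal_py (patterns : List String) (out : Int) : Prop := out = patterns_to_signal_py_alt patterns
instance (patterns : List String) (out : Int) : Decidable (Spec_patterns_to_signal_py patterns out) := by unfold Spec_patterns_to_signal_py; infer_instance

-- ===== CLAIM (what is proved, stated in full; the proofs are below) =====
def Claim_equal_patterns_to_signal_py : Prop := ∀ (patterns : List String), Dom_patterns_to_signal_py patterns → Spec_patterns_to_signal_py patterns (patterns_to_signal_py patterns)

-- ===== LEMMAS AND PROOFS =====

-- the net accumulator is always (bull count so far) − (bear count so far)
theorem pv_net_eq (patterns : List String) : ∀ (x y : Int),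
    patterns.foldl (fun net p => net + pvScoreDict.getD p 0) (x - y)
      = patterns.foldl (fun acc p => if p ∈ (["HAMMER", "BULLISH_ENGULFING", "MORNING_STAR"] : List String) then acc + 1 else acc) x
        - patterns.foldl (fun acc p => if p ∈ (["SHOOTING_STAR", "BEARISH_ENGULFING", "EVENING_STAR"] : List String) then acc + 1 else acc) y := by
  induction patterns with
  | nil => intro x y; simp
  | cons p ps ih =>
    intro x y
    simp only [List.foldl_cons]
    by_cases hb : p ∈ (["HAMMER", "BULLISH_ENGULFING", "MORNING_STAR"] : List String)
    · have hs : pvScoreDict.getD p 0 = 1 := by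
        fin_cases hb <;> decide
      have hr : p ∉ (["SHOOTING_STAR", "BEARISH_ENGULFING", "EVENING_STAR"] : List String) := by
        fin_cases hb <;> decide
      rw [if_pos hb, if_neg hr, hs]
      have : x - y + 1 = (x + 1) - y := by ring
      rw [this]; exact ih (x + 1) y
    · by_cases hr : p ∈ (["SHOOTING_STAR", "BEARISH_ENGULFING", "EVENING_STAR"] : List String)
      · have hs : pvScoreDict.getD p 0 = -1 := by
          fin_cases hr <;> decide
        rw [if_neg hb, if_pos hr, hs]
        have : x - y + -1 = x - (y + 1) := by ring
        rw [this]; exact ih x (y + 1)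
      · have hs : pvScoreDict.getD p 0 = 0 := by
          simp only [List.mem_cons, not_or] at hb hr
          have hd : pvScoreDict = PySem.Dict.mk [("HAMMER", 1), ("BULLISH_ENGULFING", 1),
              ("MORNING_STAR", 1), ("SHOOTING_STAR", -1), ("BEARISH_ENGULFING", -1),
              ("EVENING_STAR", -1)] := by decide
          simp [hd, PySem.Dict.getD, PySem.Dict.get?, PySem.Dict.get?_mk_cons, Ne.symm hb.1, Ne.symm hb.2.1,
            Ne.symm hb.2.2.1, Ne.symm hr.1, Ne.symm hr.2.1, Ne.symm hr.2.2.1]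
        rw [if_neg hb, if_neg hr, hs, add_zero]
        exact ih x y

-- ===== VERDICT (by name: the statement is the Claim_ definition above) =====
theorem patterns_to_signal_py_spec : Claim_equal_patterns_to_signal_py := by
  intro patterns _
  unfold Spec_patterns_to_signal_py patterns_to_signal_py patterns_to_signal_py_alt
  have h := pv_net_eq patterns 0 0
  simp only [sub_zero] at h
  simp only [h]
  split_ifs <;> omega
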